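-- pv_equiv track=rewrite | github.com/NeptuneOff/CAPES-NSI | capes.py | saut_max_naif
-- ===== SOURCE A (Python) =====
-- def saut_max_naif(li):
--     saut_max = (0,0)
--     val_max = li[0]-li[0]
--     n = len(li)
--     for i in range(n):
--         for j in range(i, n):
--             if li[j]-li[i] > val_max:
--                 saut_max = (i,j)
--                 val_max = li[j]-li[i]
--     return saut_max
-- ===== SOURCE B (Python) =====
-- def saut_max_naif(li):
--     # One pass: track the first index of the running prefix minimum;
--     # best jump so far with strict improvement (keeps A's tie-breaking).
--     best = 0
--     pair = (0, 0)
--     min_val = None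
--     min_idx = 0
--     for j, v in enumerate(li):
--         if min_val is None or v < min_val:
--             min_val = v
--             min_idx = j
--         d = v - min_val
--         if d > best:
--             best = d
--             pair = (min_idx, j)
--     return pair
-- ===== Notes on version B (the rewrite author's own statement) =====
-- stated objective: faster
-- what changed: replaces the O(n^2) scan over all pairs (i,j) by a single left-to-right pass that tracks the first index of the running prefix minimum and updates the best jump on strict improvement (reproducing A's tie-breaking)
import Mathlib
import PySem

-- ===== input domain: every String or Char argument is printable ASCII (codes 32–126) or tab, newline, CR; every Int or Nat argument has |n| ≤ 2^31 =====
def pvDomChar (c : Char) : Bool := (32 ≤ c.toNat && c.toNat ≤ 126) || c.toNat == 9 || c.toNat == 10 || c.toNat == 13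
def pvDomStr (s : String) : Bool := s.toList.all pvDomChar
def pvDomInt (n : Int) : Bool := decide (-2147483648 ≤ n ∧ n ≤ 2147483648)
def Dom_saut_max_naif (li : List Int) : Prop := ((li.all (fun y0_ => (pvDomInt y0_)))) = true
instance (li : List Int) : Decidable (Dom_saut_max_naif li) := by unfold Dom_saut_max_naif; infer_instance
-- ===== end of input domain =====

-- B replaces A's O(n^2) all-pairs scan by a single pass tracking the first index of the
-- running prefix minimum (same return value; objective: faster, asymptotic).

-- ===== PORT A =====
def saut_max_naif (li : List Int) : Int × Int :=
  -- saut_max = (0,0); val_max = li[0]-li[0]; nested loops over i, j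
  let val_max := PySem.List.pyGetD li 0 0 - PySem.List.pyGetD li 0 0
  let n : Int := PySem.List.len li
  let st := (PySem.List.pyRange 0 n 1).foldl (fun st i =>
    (PySem.List.pyRange i n 1).foldl (fun st j =>
      if PySem.List.pyGetD li j 0 - PySem.List.pyGetD li i 0 > st.2 then
        ((i, j), PySem.List.pyGetD li j 0 - PySem.List.pyGetD li i 0)
      else st) st) (((0:Int), (0:Int)), val_max)
  st.1

-- ===== PORT B =====
def saut_max_naif_alt (li : List Int) : Int × Int :=
  -- best = 0; pair = (0,0); min_val = None; min_idx = 0; one pass over enumerate(li)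
  let st := (PySem.List.enumerate li 0).foldl
    (fun (st : Int × (Int × Int) × Option Int × Int) jv =>
      let j := jv.1
      let v := jv.2
      let p : Option Int × Int :=
        match st.2.2.1 with
        | none => (some v, j)
        | some m => if v < m then (some v, j) else (some m, st.2.2.2)
      let d := v - p.1.getD 0
      if d > st.1 then (d, (p.2, j), p) else (st.1, st.2.1, p))
    ((0 : Int), ((0:Int),(0:Int)), (none : Option Int), (0:Int))
  st.2.1

-- ===== PRECONDITION & SPEC =====
-- Pre_ excludes exactly the empty list, on which the Python A raises IndexError at its initial element access.
def Pre_saut_max_naif (li : List Int) : Prop := li ≠ []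
instance (li : List Int) : Decidable (Pre_saut_max_naif li) := by unfold Pre_saut_max_naif; infer_instance
def pvWitness_saut_max_naif : List Int := [1, -2, 3]

def Spec_saut_max_naif (li : List Int) (out : Int × Int) : Prop := out = saut_max_naif_alt li
instance (li : List Int) (out : Int × Int) : Decidable (Spec_saut_max_naif li out) := by unfold Spec_saut_max_naif; infer_instance

-- ===== CLAIM (what is proved, stated in full; the proofs are below) =====
def Claim_equal_saut_max_naif : Prop := ∀ (li : List Int), Dom_saut_max_naif li → Pre_saut_max_naif li → Spec_saut_max_naif li (saut_max_naif li)

-- ===== LEMMAS AND PROOFS =====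

def pvV (li : List Int) (k : Nat) : Int := li.getD k 0
def pvStep (st c : (Int × Int) × Int) : (Int × Int) × Int := if c.2 > st.2 then c else st
def pvF (cs : List ((Int × Int) × Int)) : (Int × Int) × Int := cs.foldl pvStep ((0,0),0)
def pvMaxv (cs : List ((Int × Int) × Int)) (d : Int) : Int := cs.foldl (fun m c => max m c.2) d

theorem pvMaxv_cons (c : (Int × Int) × Int) (cs : List ((Int × Int) × Int)) (d : Int) :
    pvMaxv (c :: cs) d = pvMaxv cs (max d c.2) := rfl

theorem le_pvMaxv (cs : List ((Int × Int) × Int)) (d : Int) : d ≤ pvMaxv cs d :=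
  (PySem.List.le_foldl_max_int cs (·.2) d).1

theorem mem_le_pvMaxv (cs : List ((Int × Int) × Int)) (d : Int) (c : (Int × Int) × Int)
    (hc : c ∈ cs) : c.2 ≤ pvMaxv cs d :=
  (PySem.List.le_foldl_max_int cs (·.2) d).2 c hc

theorem pvMaxv_le (cs : List ((Int × Int) × Int)) (d m : Int) (hd : d ≤ m)
    (h : ∀ c ∈ cs, c.2 ≤ m) : pvMaxv cs d ≤ m := by
  induction cs generalizing d with
  | nil => exact hd
  | cons c cs ih =>
      rw [pvMaxv_cons]
      exact ih _ (max_le hd (h c List.mem_cons_self)) (fun x hx => h x (List.mem_cons_of_mem _ hx))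

theorem pvMaxv_mem (cs : List ((Int × Int) × Int)) (d : Int) :
    pvMaxv cs d = d ∨ ∃ c ∈ cs, c.2 = pvMaxv cs d := by
  induction cs generalizing d with
  | nil => exact Or.inl rfl
  | cons c cs ih =>
      rw [pvMaxv_cons]
      rcases ih (max d c.2) with h | ⟨x, hx, hx2⟩
      · rw [h]
        rcases max_choice d c.2 with h2 | h2
        · exact Or.inl h2
        · exact Or.inr ⟨c, List.mem_cons_self, h2.symm⟩
      · exact Or.inr ⟨x, List.mem_cons_of_mem _ hx, hx2⟩

theorem pvFoldl_step_char (cs : List ((Int × Int) × Int)) (st : (Int × Int) × Int) :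
    cs.foldl pvStep st = if pvMaxv cs st.2 > st.2
      then (cs.find? (fun c => c.2 == pvMaxv cs st.2)).getD st
      else st := by
  induction cs generalizing st with
  | nil => simp [pvMaxv]
  | cons c cs ih =>
      rw [List.foldl_cons, pvMaxv_cons]
      by_cases hc : c.2 > st.2
      · have hmax : max st.2 c.2 = c.2 := max_eq_right (le_of_lt hc)
        rw [hmax]
        have hstep : pvStep st c = c := by simp [pvStep, hc]
        rw [hstep, ih c]
        have hle : c.2 ≤ pvMaxv cs c.2 := le_pvMaxv cs c.2
        by_cases h2 : pvMaxv cs c.2 > c.2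
        · -- max comes from the tail and is > c.2, hence > st.2; find? skips c
          have hgt : pvMaxv cs c.2 > st.2 := lt_trans hc h2
          rw [if_pos h2, if_pos hgt, List.find?_cons]
          have hne : (c.2 == pvMaxv cs c.2) = false := by
            simp only [beq_eq_false_iff_ne, ne_eq]
            omega
          rw [hne]
          -- both getD defaults agree, since find? is some (the max is attained in cs)
          have hsome : (cs.find? (fun c' => c'.2 == pvMaxv cs c.2)).isSome := by
            rcases pvMaxv_mem cs c.2 with h3 | ⟨x, hx, hx2⟩
            · omega
            · exact List.find?_isSome.mpr ⟨x, hx, by simp [hx2]⟩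
          obtain ⟨y, hy⟩ := Option.isSome_iff_exists.mp hsome
          rw [hy]; rfl
        · have heq : pvMaxv cs c.2 = c.2 := le_antisymm (not_lt.mp h2) hle
          rw [if_neg h2, heq, if_pos hc, List.find?_cons]
          simp
      · have hmax : max st.2 c.2 = st.2 := max_eq_left (not_lt.mp hc)
        rw [hmax]
        have hstep : pvStep st c = st := by simp [pvStep, hc]
        rw [hstep, ih st]
        by_cases h2 : pvMaxv cs st.2 > st.2
        · rw [if_pos h2, if_pos h2, List.find?_cons]
          have hne : (c.2 == pvMaxv cs st.2) = false := by
            simp only [beq_eq_false_iff_ne, ne_eq]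
            omega
          rw [hne]
        · rw [if_neg h2, if_neg h2]

def pvMp (li : List Int) : Nat → Int
  | 0 => pvV li 0
  | j+1 => min (pvMp li j) (pvV li (j+1))
def pvMi (li : List Int) : Nat → Nat
  | 0 => 0
  | j+1 => if pvV li (j+1) < pvMp li j then j+1 else pvMi li j
def pvCandB (li : List Int) (j : Nat) : (Int × Int) × Int :=
  (((pvMi li j : Int), (j : Int)), pvV li j - pvMp li j)
def pvCandsB (li : List Int) : List ((Int × Int) × Int) := (List.range li.length).map (pvCandB li)
def pvBlock (li : List Int) (i : Nat) : List ((Int × Int) × Int) :=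
  (List.range' i (li.length - i)).map (fun (j : Nat) => (((i:Int),(j:Int)), pvV li j - pvV li i))
def pvCandsA (li : List Int) : List ((Int × Int) × Int) := (List.range li.length).flatMap (pvBlock li)

theorem pvMi_le (li : List Int) (j : Nat) : pvMi li j ≤ j := by
  induction j with
  | zero => simp [pvMi]
  | succ j ih => rw [pvMi]; split <;> omega

theorem pvMp_eq (li : List Int) (j : Nat) : pvMp li j = pvV li (pvMi li j) := by
  induction j with
  | zero => rfl
  | succ j ih =>
      rw [pvMp, pvMi]
      by_cases h : pvV li (j+1) < pvMp li j
      · rw [if_pos h, min_eq_right (le_of_lt h)]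
      · rw [if_neg h, min_eq_left (not_lt.mp h), ih]

theorem pvMp_le (li : List Int) (i j : Nat) (hij : i ≤ j) : pvMp li j ≤ pvV li i := by
  induction j with
  | zero => rw [Nat.le_zero.mp hij]; exact le_refl _
  | succ j ih =>
      rw [pvMp]
      rcases Nat.le_succ_iff.mp hij with h | h
      · exact le_trans (min_le_left _ _) (ih h)
      · rw [h]; exact min_le_right _ _

theorem pvMp_anti (li : List Int) (j j' : Nat) (h : j ≤ j') : pvMp li j' ≤ pvMp li j := by
  induction j' with
  | zero => rw [Nat.le_zero.mp h]
  | succ j' ih =>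
      rcases Nat.le_succ_iff.mp h with h2 | h2
      · exact le_trans (min_le_left _ _) (ih h2)
      · rw [h2]

theorem pvMi_first (li : List Int) (j k : Nat) (hk : k < pvMi li j) : pvMp li j < pvV li k := by
  induction j with
  | zero => simp [pvMi] at hk
  | succ j ih =>
      rw [pvMi] at hk
      rw [pvMp]
      by_cases h : pvV li (j+1) < pvMp li j
      · rw [if_pos h] at hk
        rw [min_eq_right (le_of_lt h)]
        exact lt_of_lt_of_le h (pvMp_le li k j (by omega))
      · rw [if_neg h] at hk
        rw [min_eq_left (not_lt.mp h)]
        exact ih hk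

-- find? over a mapped range': the first index satisfying the predicate wins
theorem pvFind?_map_range' (f : Nat → (Int × Int) × Int) (p : (Int × Int) × Int → Bool)
    (s n j0 : Nat) (hs : s ≤ j0) (hj0 : j0 < s + n) (hp : p (f j0) = true)
    (hmin : ∀ k, s ≤ k → k < j0 → p (f k) = false) :
    ((List.range' s n).map f).find? p = some (f j0) := by
  induction n generalizing s with
  | zero => omega
  | succ n ih =>
      rw [List.range'_succ, List.map_cons, List.find?_cons]
      by_cases h : s = j0
      · subst h; rw [hp]
      · rw [hmin s (le_refl s) (by omega)]
        exact ih (s+1) (by omega) (by omega) (fun k hk1 hk2 => hmin k (by omega) hk2)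

theorem pvFind?_flatMap_range' (g : Nat → List ((Int × Int) × Int)) (p : (Int × Int) × Int → Bool)
    (s n i1 : Nat) (c0 : (Int × Int) × Int) (hs : s ≤ i1) (hi1 : i1 < s + n)
    (hnone : ∀ i, s ≤ i → i < i1 → ∀ c ∈ g i, p c = false)
    (hfind : (g i1).find? p = some c0) :
    (((List.range' s n).flatMap g).find? p = some c0) := by
  induction n generalizing s with
  | zero => omega
  | succ n ih =>
      rw [List.range'_succ, List.flatMap_cons, List.find?_append]
      by_cases h : s = i1
      · subst h; rw [hfind]; rfl
      · rw [List.find?_eq_none.mpr (fun x hx => by simp [hnone s (le_refl s) (by omega) x hx])]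
        exact ih (s+1) (by omega) (by omega) (fun i hi1' hi2 => hnone i (by omega) hi2)

theorem mem_pvCandsB (li : List Int) (c : (Int × Int) × Int) :
    c ∈ pvCandsB li ↔ ∃ j, j < li.length ∧ c = pvCandB li j := by
  simp only [pvCandsB, List.mem_map, List.mem_range]
  constructor
  · rintro ⟨j, hj, rfl⟩; exact ⟨j, hj, rfl⟩
  · rintro ⟨j, hj, rfl⟩; exact ⟨j, hj, rfl⟩

theorem mem_pvCandsA (li : List Int) (c : (Int × Int) × Int) :
    c ∈ pvCandsA li ↔ ∃ i j : Nat, i ≤ j ∧ j < li.length ∧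
      c = (((i:Int),(j:Int)), pvV li j - pvV li i) := by
  simp only [pvCandsA, pvBlock, List.mem_flatMap, List.mem_range, List.mem_map,
    List.mem_range'_1]
  constructor
  · rintro ⟨i, hi, j, ⟨hij, hj⟩, rfl⟩
    exact ⟨i, j, hij, by omega, rfl⟩
  · rintro ⟨i, j, hij, hj, rfl⟩
    exact ⟨i, by omega, j, ⟨hij, by omega⟩, rfl⟩

theorem pvMmax (li : List Int) : pvMaxv (pvCandsA li) 0 = pvMaxv (pvCandsB li) 0 := by
  apply le_antisymm
  · apply pvMaxv_le _ _ _ (le_pvMaxv _ 0)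
    intro c hc
    obtain ⟨i, j, hij, hj, rfl⟩ := (mem_pvCandsA li c).mp hc
    calc pvV li j - pvV li i ≤ pvV li j - pvMp li j := by
          have := pvMp_le li i j hij; omega
      _ = (pvCandB li j).2 := rfl
      _ ≤ pvMaxv (pvCandsB li) 0 :=
          mem_le_pvMaxv _ _ _ ((mem_pvCandsB li _).mpr ⟨j, hj, rfl⟩)
  · apply pvMaxv_le _ _ _ (le_pvMaxv _ 0)
    intro c hc
    obtain ⟨j, hj, rfl⟩ := (mem_pvCandsB li c).mp hc
    have : (pvCandB li j).2 = pvV li j - pvV li (pvMi li j) := by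
      simp [pvCandB, pvMp_eq]
    rw [this]
    exact mem_le_pvMaxv _ _ _ ((mem_pvCandsA li _).mpr ⟨pvMi li j, j, pvMi_le li j, hj, rfl⟩)

theorem pvCore (li : List Int) : pvF (pvCandsA li) = pvF (pvCandsB li) := by
  unfold pvF
  rw [pvFoldl_step_char, pvFoldl_step_char]
  simp only []
  rw [show pvMaxv (pvCandsA li) ((0:Int)) = pvMaxv (pvCandsB li) 0 from pvMmax li]
  by_cases hM : pvMaxv (pvCandsB li) 0 > 0
  · rw [if_pos hM, if_pos hM]
    set M := pvMaxv (pvCandsB li) 0 with hMdef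
    -- there is an attaining index for candsB
    have hex : ∃ j, j < li.length ∧ pvV li j - pvMp li j = M := by
      rcases pvMaxv_mem (pvCandsB li) 0 with h | ⟨c, hc, hc2⟩
      · omega
      · obtain ⟨j, hj, rfl⟩ := (mem_pvCandsB li c).mp hc
        exact ⟨j, hj, hc2⟩
    set j0 := Nat.find hex with hj0def
    obtain ⟨hj0len, hQ0⟩ := Nat.find_spec hex
    set i1 := pvMi li j0 with hi1def
    have hi1le : i1 ≤ j0 := pvMi_le li j0
    have hvi1 : pvV li i1 = pvMp li j0 := (pvMp_eq li j0).symm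
    have bndB : ∀ j, j < li.length → pvV li j - pvMp li j ≤ M :=
      fun j hj => mem_le_pvMaxv _ _ _ ((mem_pvCandsB li _).mpr ⟨j, hj, rfl⟩)
    have hL2 : ∀ j, i1 ≤ j → j < j0 → pvV li j - pvV li i1 ≠ M := by
      intro j h1 h2 hval
      have hjlen : j < li.length := by omega
      have hmple : pvMp li j ≤ pvV li i1 := pvMp_le li i1 j h1
      have hQ : pvV li j - pvMp li j = M := by
        have := bndB j hjlen; omega
      have : j0 ≤ j := Nat.find_min' hex ⟨hjlen, hQ⟩
      omega
    have hL1 : ∀ i, i < i1 → ∀ j, i ≤ j → j < li.length → pvV li j - pvV li i ≠ M := by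
      intro i hi j hij hjlen hval
      have h1 : pvMp li j ≤ pvV li i := pvMp_le li i j hij
      have hQ : pvV li j - pvMp li j = M := by
        have := bndB j hjlen; omega
      have hj0le : j0 ≤ j := Nat.find_min' hex ⟨hjlen, hQ⟩
      have h3 : pvMp li j ≤ pvMp li j0 := pvMp_anti li j0 j hj0le
      have h4 : pvMp li j0 ≤ pvV li i := pvMp_le li i j0 (by omega)
      have h5 : pvMp li j0 < pvV li i := pvMi_first li j0 i hi
      omega
    have findB : (pvCandsB li).find? (fun c => c.2 == M) = some (pvCandB li j0) := by
      rw [pvCandsB, List.range_eq_range']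
      apply pvFind?_map_range' _ _ 0 li.length j0 (Nat.zero_le _) (by omega)
      · simp only [pvCandB, beq_iff_eq]; exact hQ0
      · intro k _ hk
        simp only [pvCandB, beq_eq_false_iff_ne, ne_eq]
        have : ¬ (j0 ≤ k) := by omega
        intro hc
        exact this (Nat.find_min' hex ⟨by omega, hc⟩)
    have findA : (pvCandsA li).find? (fun c => c.2 == M) = some (pvCandB li j0) := by
      rw [pvCandsA, List.range_eq_range']
      apply pvFind?_flatMap_range' _ _ 0 li.length i1 _ (Nat.zero_le _) (by omega)
      · intro i _ hi c hc
        simp only [pvBlock, List.mem_map, List.mem_range'_1] at hc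
        obtain ⟨j, ⟨hij, hj⟩, rfl⟩ := hc
        simp only [beq_eq_false_iff_ne, ne_eq]
        exact hL1 i hi j hij (by omega)
      · rw [pvBlock]
        have : pvCandB li j0 = (((i1:Int),(j0:Int)), pvV li j0 - pvV li i1) := by
          simp only [pvCandB]; rw [hvi1]
        rw [this]
        apply pvFind?_map_range' (fun j => (((i1:Int),(j:Int)), pvV li j - pvV li i1))
          _ i1 (li.length - i1) j0 hi1le (by omega)
        · simp only [beq_iff_eq]
          rw [hvi1]; exact hQ0
        · intro k h1 h2
          simp only [beq_eq_false_iff_ne, ne_eq]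
          exact hL2 k h1 h2
    rw [findA, findB]
  · rw [if_neg hM, if_neg hM]

-- the port's loop body at index k with value pvV li k
def pvBodyB (li : List Int) (st : Int × (Int × Int) × Option Int × Int) (k : Nat) :
    Int × (Int × Int) × Option Int × Int :=
  let v := pvV li k
  let p : Option Int × Int :=
    match st.2.2.1 with
    | none => (some v, (k : Int))
    | some m => if v < m then (some v, (k : Int)) else (some m, st.2.2.2)
  let d := v - p.1.getD 0
  if d > st.1 then (d, (p.2, (k : Int)), p) else (st.1, st.2.1, p)

theorem pvB_red (li : List Int) :
    saut_max_naif_alt li = ((List.range li.length).foldl (pvBodyB li)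
      ((0 : Int), ((0:Int),(0:Int)), (none : Option Int), (0:Int))).2.1 := by
  simp only [saut_max_naif_alt, PySem.List.enumerate_eq_map_pyRange li 0,
    PySem.List.len_eq, PySem.List.pyRange_one, List.foldl_map, Int.sub_zero,
    Int.toNat_natCast, zero_add, PySem.List.pyGetD_natCast]
  rfl

theorem pvB_inv (li : List Int) (n : Nat) :
    (List.range (n+1)).foldl (pvBodyB li) ((0 : Int), ((0:Int),(0:Int)), (none : Option Int), (0:Int))
      = (let G := pvF ((List.range (n+1)).map (pvCandB li));
         (G.2, G.1, some (pvMp li n), ((pvMi li n : Int)))) := by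
  induction n with
  | zero => simp [pvBodyB, pvF, pvStep, pvCandB, pvMp, pvMi, List.range_succ]
  | succ n ih =>
      rw [List.range_succ, List.foldl_append, ih]
      simp only [List.map_append, List.map_cons, List.map_nil, pvF, List.foldl_append]
      simp only [List.foldl_cons, List.foldl_nil, pvBodyB, pvStep, pvCandB]
      simp only [show pvMp li (n+1) = min (pvMp li n) (pvV li (n+1)) from rfl,
                 show pvMi li (n+1) = if pvV li (n+1) < pvMp li n then n+1 else pvMi li n from rfl]
      by_cases h : pvV li (n+1) < pvMp li n
      · simp only [h, min_eq_right (le_of_lt h), sub_self, if_pos]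
        split_ifs <;> simp_all
      · simp only [h, if_false, min_eq_left (not_lt.mp h)]
        split_ifs <;> simp_all

theorem pvA_eq (li : List Int) : saut_max_naif li = (pvF (pvCandsA li)).1 := by
  simp only [saut_max_naif, pvF, pvCandsA, pvBlock, pvStep, pvV, PySem.List.len_eq,
    PySem.List.pyRange_one, List.foldl_flatMap, List.foldl_map, List.range'_eq_map_range,
    Int.sub_zero, Int.toNat_natCast, sub_self, zero_add, Int.toNat_sub,
    ← Nat.cast_add, PySem.List.pyGetD_natCast]

theorem pvB_eq (li : List Int) : saut_max_naif_alt li = (pvF (pvCandsB li)).1 := by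
  rw [pvB_red]
  cases hn : li.length with
  | zero => simp [pvCandsB, hn, pvF]
  | succ n => rw [pvB_inv]; simp only [pvCandsB, hn]

-- ===== VERDICT (by name: the statement is the Claim_ definition above) =====
theorem saut_max_naif_spec : Claim_equal_saut_max_naif := by
  intro li _ _
  unfold Spec_saut_max_naif
  rw [pvA_eq, pvB_eq, pvCore]
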